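-- pv_equiv track=rewrite | github.com/kai3n/fastcampus | SeongPil_Lee.py | new_lower
-- ===== SOURCE A (Python) =====
-- def new_lower(string):
--     chars = ''
--     for char in string:
--         asci = ord(char)
--         if 64 < asci and asci < 91:
--             asci += 32
--             chars += chr(asci)
--         elif 96 < asci and asci < 123 or asci == 32:
--             chars += chr(asci)
--         else:
--             return 'arg must be only str'
--     return chars
-- ===== SOURCE B (Python) =====
-- def new_lower(string):
--     if all(c == ' ' or 'A' <= c <= 'Z' or 'a' <= c <= 'z' for c in string):
--         return string.lower()
--     return 'arg must be only str'
-- ===== Notes on version B (the rewrite author's own statement) =====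
-- stated objective: idiomatic
-- what changed: Replaces the single loop interleaving ord/chr arithmetic with early return by a separate validation pass (all characters letter-or-space) followed by one str.lower() library call.
import Mathlib
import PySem

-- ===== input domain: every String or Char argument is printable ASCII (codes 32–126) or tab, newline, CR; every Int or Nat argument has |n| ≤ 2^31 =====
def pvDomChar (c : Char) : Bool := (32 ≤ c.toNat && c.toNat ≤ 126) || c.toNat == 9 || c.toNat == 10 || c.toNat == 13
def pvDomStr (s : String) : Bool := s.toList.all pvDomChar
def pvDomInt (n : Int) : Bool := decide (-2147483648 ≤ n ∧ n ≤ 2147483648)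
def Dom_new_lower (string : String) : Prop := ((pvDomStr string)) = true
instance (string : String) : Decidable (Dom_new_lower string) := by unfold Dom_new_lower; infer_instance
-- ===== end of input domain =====

-- B separates a validation pass (every char is an ASCII letter or space) from one lower() call,
-- instead of A's single loop interleaving ord/chr arithmetic with an early error return (idiomatic).

-- ===== PORT A =====
-- the for-loop of A: state = accumulated chars; early return on an invalid char
def newLowerGo : List Char → List Char → String
  | [], chars => String.ofList chars
  | c :: rest, chars =>
    let asci := c.toNat
    if 64 < asci ∧ asci < 91 then
      newLowerGo rest (chars ++ [Char.ofNat (asci + 32)])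
    else if (96 < asci ∧ asci < 123) ∨ asci = 32 then
      newLowerGo rest (chars ++ [c])
    else "arg must be only str"

def new_lower (string : String) : String := newLowerGo string.toList []

-- ===== PORT B =====
def validChar (c : Char) : Bool := c == ' ' || ('A' ≤ c && c ≤ 'Z') || ('a' ≤ c && c ≤ 'z')

def new_lower_alt (string : String) : String :=
  if string.toList.all validChar then PySem.Str.lower string
  else "arg must be only str"

-- ===== PRECONDITION & SPEC =====
def Spec_new_lower (string : String) (out : String) : Prop := out = new_lower_alt string
instance (string : String) (out : String) : Decidable (Spec_new_lower string out) := by unfold Spec_new_lower; infer_instance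

-- ===== CLAIM (what is proved, stated in full; the proofs are below) =====
def Claim_equal_new_lower : Prop := ∀ (string : String), Dom_new_lower string → Spec_new_lower string (new_lower string)

-- ===== LEMMAS AND PROOFS =====

theorem charLe (a b : Char) : (a ≤ b) ↔ (a.toNat ≤ b.toNat) := Iff.rfl
theorem charEq (a b : Char) : (a == b) = true ↔ a.toNat = b.toNat :=
  ⟨fun h => by rw [eq_of_beq h], fun h => beq_iff_eq.mpr (Char.ext (UInt32.toNat_inj.mp h))⟩
theorem toNat_A : 'A'.toNat = 65 := rfl
theorem toNat_Z : 'Z'.toNat = 90 := rfl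
theorem toNat_a : 'a'.toNat = 97 := rfl
theorem toNat_z : 'z'.toNat = 122 := rfl
theorem toNat_sp : ' '.toNat = 32 := rfl

theorem validChar_iff (c : Char) : validChar c = true ↔
    c.toNat = 32 ∨ (65 ≤ c.toNat ∧ c.toNat ≤ 90) ∨ (97 ≤ c.toNat ∧ c.toNat ≤ 122) := by
  simp only [validChar, Bool.or_eq_true, Bool.and_eq_true, decide_eq_true_eq, charLe, charEq,
    toNat_A, toNat_Z, toNat_a, toNat_z, toNat_sp]
  tauto

theorem lowerChar_upper (c : Char) (h : 64 < c.toNat ∧ c.toNat < 91) :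
    PySem.Chars.lowerChar c = Char.ofNat (c.toNat + 32) := by
  rw [PySem.Chars.lowerChar]
  simp only [PySem.Chars.isupper, Bool.and_eq_true, decide_eq_true_eq, charLe, toNat_A, toNat_Z]
  rw [if_pos (by omega)]

theorem lowerChar_other (c : Char) (h : ¬(64 < c.toNat ∧ c.toNat < 91)) :
    PySem.Chars.lowerChar c = c := by
  rw [PySem.Chars.lowerChar]
  simp only [PySem.Chars.isupper, Bool.and_eq_true, decide_eq_true_eq, charLe, toNat_A, toNat_Z]
  rw [if_neg (by omega)]

theorem newLowerGo_eq (l : List Char) : ∀ acc : List Char,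
    newLowerGo l acc =
      if l.all validChar then String.ofList (acc ++ PySem.Chars.lower l)
      else "arg must be only str" := by
  induction l with
  | nil => intro acc; simp [newLowerGo, PySem.Chars.lower]
  | cons c rest ih =>
    intro acc
    by_cases h1 : 64 < c.toNat ∧ c.toNat < 91
    · have hv : validChar c = true := (validChar_iff c).mpr (by omega)
      simp [newLowerGo, h1, ih, hv, PySem.Chars.lower, lowerChar_upper c h1]
    · by_cases h2 : (96 < c.toNat ∧ c.toNat < 123) ∨ c.toNat = 32
      · have hv : validChar c = true := (validChar_iff c).mpr (by omega)
        simp [newLowerGo, h1, h2, ih, hv, PySem.Chars.lower, lowerChar_other c h1]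
      · have hv : validChar c = false := by
          rw [← Bool.not_eq_true, validChar_iff]; omega
        simp [newLowerGo, h1, h2, hv]

-- ===== VERDICT (by name: the statement is the Claim_ definition above) =====
theorem new_lower_spec : Claim_equal_new_lower := by
  intro s _
  unfold Spec_new_lower new_lower new_lower_alt
  rw [newLowerGo_eq]
  split_ifs with h
  · exact String.ext (by simp [PySem.Str.toList_lower, String.toList_ofList])
  · rfl
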